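-- pv_equiv track=rewrite | github.com/cnbrown04/hackathon-rfid | apps/host-app/mqtt-postgres-writer/mqtt_localization_calibrated.py | best_score_per_line
-- ===== SOURCE A (Python) =====
-- def best_score_per_line(scored):
--     out = {}
--     for item in scored:
--         line = item["line"]
--         s = item["score"]
--         if line not in out or s < out[line]:
--             out[line] = s
--     return out
-- ===== SOURCE B (Python) =====
-- def best_score_per_line(scored):
--     groups = {}
--     for item in scored:
--         groups.setdefault(item["line"], []).append(item["score"])
--     return {line: min(scores) for line, scores in groups.items()}
-- ===== Notes on version B (the rewrite author's own statement) =====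
-- stated objective: alternative
-- what changed: B first groups all scores per line into lists in one pass and then reduces each list with min(), instead of maintaining a running minimum per line inside the loop.
import Mathlib
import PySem

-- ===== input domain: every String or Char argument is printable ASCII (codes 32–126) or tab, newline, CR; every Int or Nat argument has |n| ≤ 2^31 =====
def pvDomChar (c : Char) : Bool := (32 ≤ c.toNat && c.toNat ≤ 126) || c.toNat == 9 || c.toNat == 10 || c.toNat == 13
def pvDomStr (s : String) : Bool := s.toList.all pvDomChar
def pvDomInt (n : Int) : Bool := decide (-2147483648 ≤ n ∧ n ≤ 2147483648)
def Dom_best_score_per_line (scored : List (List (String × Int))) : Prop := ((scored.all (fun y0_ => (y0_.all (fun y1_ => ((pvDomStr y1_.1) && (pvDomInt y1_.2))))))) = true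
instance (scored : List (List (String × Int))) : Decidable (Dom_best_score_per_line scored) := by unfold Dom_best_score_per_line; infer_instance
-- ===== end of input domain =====

-- B groups all scores per line into lists in one pass, then reduces each list with min;
-- A keeps a running minimum per line instead. Equivalence is about the return value.

-- ===== PORT A =====
-- loop body of A: out[line] = s when line is new or s beats the stored minimum
def bsplStepA (out : PySem.Dict Int Int) (item : List (String × Int)) : PySem.Dict Int Int :=
  let line := (PySem.Dict.mk item).getD "line" 0
  let s := (PySem.Dict.mk item).getD "score" 0
  if out.contains line = false ∨ s < out.getD line 0 then out.insert line s else out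

def best_score_per_line (scored : List (List (String × Int))) : List (Int × Int) :=
  (scored.foldl bsplStepA PySem.Dict.empty).items

-- ===== PORT B =====
-- loop body of B: groups.setdefault(item["line"], []).append(item["score"])
def bsplStepB (g : PySem.Dict Int (List Int)) (item : List (String × Int)) : PySem.Dict Int (List Int) :=
  g.modify ((PySem.Dict.mk item).getD "line" 0) [] (· ++ [(PySem.Dict.mk item).getD "score" 0])

def best_score_per_line_alt (scored : List (List (String × Int))) : List (Int × Int) :=
  ((scored.foldl bsplStepB PySem.Dict.empty).items).map
    (fun p => (p.1, PySem.List.minD p.2 (fun x => x) 0))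

-- ===== PRECONDITION & SPEC =====
-- Pre_: every item dict has both keys "line" and "score"; otherwise Python A raises KeyError.
def Pre_best_score_per_line (scored : List (List (String × Int))) : Prop :=
  ∀ item ∈ scored, (PySem.Dict.mk item).contains "line" = true ∧ (PySem.Dict.mk item).contains "score" = true
instance (scored : List (List (String × Int))) : Decidable (Pre_best_score_per_line scored) := by unfold Pre_best_score_per_line; infer_instance

def pvWitness_best_score_per_line : (List (List (String × Int))) :=
  [[("line", 1), ("score", 5)], [("line", 2), ("score", 3)], [("line", 1), ("score", 2)]]

def Spec_best_score_per_line (scored : List (List (String × Int))) (out : List (Int × Int)) : Prop := out = best_score_per_line_alt scored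
instance (scored : List (List (String × Int))) (out : List (Int × Int)) : Decidable (Spec_best_score_per_line scored out) := by unfold Spec_best_score_per_line; infer_instance

-- ===== CLAIM (what is proved, stated in full; the proofs are below) =====
def Claim_equal_best_score_per_line : Prop := ∀ (scored : List (List (String × Int))), Dom_best_score_per_line scored → Pre_best_score_per_line scored → Spec_best_score_per_line scored (best_score_per_line scored)

-- ===== LEMMAS AND PROOFS =====

-- reduce a grouped entry to its minimum (Python min: first minimal element)
def bsplRed (p : Int × List Int) : Int × Int := (p.1, PySem.List.minD p.2 (fun x => x) 0)

theorem bspl_min?_some (l : List Int) (a : Int) :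
    ∃ m, PySem.List.min? (a :: l) (fun x => x) = some m := by
  simp only [PySem.List.min?, List.foldl]
  induction l generalizing a with
  | nil => exact ⟨a, rfl⟩
  | cons b t ih =>
    simp only [List.foldl]
    by_cases hb : b < a <;> simp [hb] <;> [exact ih b; exact ih a]

theorem bspl_minD_append (v : List Int) (s : Int) (hv : v ≠ []) :
    PySem.List.minD (v ++ [s]) (fun x => x) 0 =
      (if s < PySem.List.minD v (fun x => x) 0 then s else PySem.List.minD v (fun x => x) 0) := by
  obtain ⟨a, t, rfl⟩ := List.exists_cons_of_ne_nil hv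
  obtain ⟨m, hm⟩ := bspl_min?_some t a
  simp only [PySem.List.minD]
  have : PySem.List.min? ((a :: t) ++ [s]) (fun x => x) =
      (if s < m then some s else some m) := by
    simp only [PySem.List.min?, List.foldl_append] at hm ⊢
    rw [hm]; simp only [List.foldl]
  rw [this, hm]
  by_cases h : s < m <;> simp [h]

theorem bspl_contains_map (l : List (Int × List Int)) (k : Int) :
    (PySem.Dict.mk (l.map bsplRed)).contains k = (PySem.Dict.mk l).contains k := by
  simp only [PySem.Dict.contains, List.any_map]
  congr 1

theorem bspl_get?_map (l : List (Int × List Int)) (k : Int) :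
    (PySem.Dict.mk (l.map bsplRed)).get? k =
      ((PySem.Dict.mk l).get? k).map (fun v => PySem.List.minD v (fun x => x) 0) := by
  simp only [PySem.Dict.get?, List.find?_map]
  have hpred : ((fun p : Int × Int => p.1 == k) ∘ bsplRed) = (fun p : Int × List Int => p.1 == k) := by
    funext p; rfl
  rw [hpred]
  cases List.find? (fun p : Int × List Int => p.1 == k) l with
  | none => rfl
  | some p => rfl

-- main loop invariant: running A's loop on the reduced dict tracks B's grouping loop
theorem bspl_inv (scored : List (List (String × Int))) :
    ∀ (g : PySem.Dict Int (List Int)), g.keys.Nodup → (∀ p ∈ g.items, p.2 ≠ []) →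
      (scored.foldl bsplStepA (PySem.Dict.mk (g.items.map bsplRed))).items =
        (scored.foldl bsplStepB g).items.map bsplRed := by
  induction scored with
  | nil => intro g _ _; rfl
  | cons item rest ih =>
    intro g hnd hne
    simp only [List.foldl]
    set line := (PySem.Dict.mk item).getD "line" 0 with hline
    set s := (PySem.Dict.mk item).getD "score" 0 with hs
    have hstepB : bsplStepB g item = g.insert line (g.getD line [] ++ [s]) := rfl
    have hkey : bsplStepA (PySem.Dict.mk (g.items.map bsplRed)) item =
        PySem.Dict.mk ((bsplStepB g item).items.map bsplRed) := by
      rw [hstepB]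
      by_cases hc : g.contains line = true
      · -- key already present
        obtain ⟨v, hv⟩ : ∃ v, g.get? line = some v := by
          cases hgv : g.get? line with
          | none =>
            exfalso
            have := (PySem.Dict.get?_eq_none_iff_contains (d := g) (k := line)).mp hgv
            simp [hc] at this
          | some v => exact ⟨v, rfl⟩
        have hvmem : (line, v) ∈ g.items := PySem.Dict.mem_items_of_get?_eq_some g hv
        have hvne : v ≠ [] := hne _ hvmem
        have hgetD : g.getD line [] = v := by simp [PySem.Dict.getD, hv]
        have hcA : (PySem.Dict.mk (g.items.map bsplRed)).contains line = true := by
          rw [bspl_contains_map]; exact hc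
        have hcurA : (PySem.Dict.mk (g.items.map bsplRed)).getD line 0 =
            PySem.List.minD v (fun x => x) 0 := by
          simp [PySem.Dict.getD, bspl_get?_map, hv]
        set m := PySem.List.minD v (fun x => x) 0 with hm
        have hinsB : (g.insert line (v ++ [s])).items =
            g.items.map (fun p => if p.1 == line then (line, v ++ [s]) else p) := by
          simp [PySem.Dict.insert, hc]
        by_cases hlt : s < m
        · -- A overwrites with s; B's reduced value is also s
          have hcond : ((PySem.Dict.mk (g.items.map bsplRed)).contains line = false ∨
              s < (PySem.Dict.mk (g.items.map bsplRed)).getD line 0) := by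
            right; rw [hcurA]; exact hlt
          simp only [bsplStepA, ← hline, ← hs, if_pos hcond]
          apply PySem.Dict.ext
          simp only [PySem.Dict.insert, bspl_contains_map, hc, if_pos, hgetD, List.map_map]
          apply List.map_congr_left
          intro p _
          by_cases hp : p.1 = line
          · simp [bsplRed, hp, bspl_minD_append v s hvne, ← hm, hlt]
          · simp [bsplRed, hp]
        · -- A keeps the stored minimum; B's reduced value stays m
          have hcond : ¬ ((PySem.Dict.mk (g.items.map bsplRed)).contains line = false ∨
              s < (PySem.Dict.mk (g.items.map bsplRed)).getD line 0) := by
            rintro (h | h)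
            · rw [hcA] at h; cases h
            · rw [hcurA] at h; exact hlt h
          simp only [bsplStepA, ← hline, ← hs, if_neg hcond]
          apply PySem.Dict.ext
          simp only [hgetD, hinsB, List.map_map]
          apply List.map_congr_left
          intro p hp
          by_cases hpk : p.1 = line
          · -- nodup keys: p must be the entry (line, v)
            have hpv : g.get? line = some p.2 := by
              rw [← hpk]
              exact PySem.Dict.get?_of_mem_items g (by simpa using hp) hnd
            have hpv2 : p.2 = v := by
              rw [hv] at hpv; exact (Option.some_inj.mp hpv).symm
            simp [bsplRed, hpk, hpv2, bspl_minD_append v s hvne, ← hm, hlt]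
          · simp [bsplRed, hpk]
      · -- fresh key: both append
        have hc' : g.contains line = false := by simpa using hc
        have hgetD : g.getD line [] = [] :=
          PySem.Dict.getD_of_not_contains g [] hc'
        have hcA : (PySem.Dict.mk (g.items.map bsplRed)).contains line = false := by
          rw [bspl_contains_map]; exact hc'
        have hcond : ((PySem.Dict.mk (g.items.map bsplRed)).contains line = false ∨
            s < (PySem.Dict.mk (g.items.map bsplRed)).getD line 0) := Or.inl hcA
        simp only [bsplStepA, ← hline, ← hs, if_pos hcond]
        apply PySem.Dict.ext
        simp [PySem.Dict.insert, hcA, hc', hgetD, bsplRed, PySem.List.minD, PySem.List.min?]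
    rw [hkey]
    apply ih
    · rw [hstepB]; exact PySem.Dict.nodup_keys_insert _ _ _ hnd
    · rw [hstepB]
      intro p hp
      rcases (PySem.Dict.mem_items_insert _ _ _ _).mp hp with h | h
      · rw [h]; simp
      · exact hne p h.1

-- ===== VERDICT (by name: the statement is the Claim_ definition above) =====
theorem best_score_per_line_spec : Claim_equal_best_score_per_line := by
  intro scored _ _
  unfold Spec_best_score_per_line best_score_per_line best_score_per_line_alt
  have h := bspl_inv scored PySem.Dict.empty (by simp [PySem.Dict.empty, PySem.Dict.keys]) (by simp [PySem.Dict.empty])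
  simpa [PySem.Dict.empty, bsplRed] using h
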